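-- pv_equiv track=rewrite | github.com/endersonjack/genesis | fornecedores/utils_doc.py | display_cnpj
-- ===== SOURCE A (Python) =====
-- def display_cnpj(digits: str) -> str:
--     d = ''.join(c for c in (digits or '') if c.isdigit())[:14]
--     if not d:
--         return ''
--     out = d[:2]
--     if len(d) > 2:
--         out += '.' + d[2:5]
--     if len(d) > 5:
--         out += '.' + d[5:8]
--     if len(d) > 8:
--         out += '/' + d[8:12]
--     if len(d) > 12:
--         out += '-' + d[12:14]
--     return out
-- ===== SOURCE B (Python) =====
-- def display_cnpj(digits: str) -> str:
--     d = ''.join(c for c in (digits or '') if c.isdigit())[:14]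
--     sep = {2: '.', 5: '.', 8: '/', 12: '-'}
--     out = ''
--     for i, c in enumerate(d):
--         out += sep.get(i, '') + c
--     return out
-- ===== Notes on version B (the rewrite author's own statement) =====
-- stated objective: alternative
-- what changed: Replaced the length-gated slice-concatenation branches by a single pass over the digit characters driven by a positional separator table (dict keyed by index).
import Mathlib
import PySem

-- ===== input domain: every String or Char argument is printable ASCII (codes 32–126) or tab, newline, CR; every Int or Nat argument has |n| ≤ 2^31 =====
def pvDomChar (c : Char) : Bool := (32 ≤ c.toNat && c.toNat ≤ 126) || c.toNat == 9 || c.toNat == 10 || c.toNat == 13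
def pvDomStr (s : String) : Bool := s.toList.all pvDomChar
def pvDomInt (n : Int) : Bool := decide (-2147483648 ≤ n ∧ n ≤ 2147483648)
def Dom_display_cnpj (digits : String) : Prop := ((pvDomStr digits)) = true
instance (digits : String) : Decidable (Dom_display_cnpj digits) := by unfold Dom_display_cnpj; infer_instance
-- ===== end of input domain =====

-- B builds the punctuated string in one enumerate pass with a positional separator table
-- instead of A's length-gated slice concatenations; same cost, different decomposition.

-- ===== PORT A =====
-- string work is done on List Char (PySem's representation); slices d[a:b] with literal
-- nonnegative bounds are exactly (drop a).take (b-a) (clamping agrees).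
def pvFmtA (d : List Char) : List Char :=
  if d = [] then [] else
    let out := d.take 2
    let out := if d.length > 2 then out ++ '.' :: ((d.drop 2).take 3) else out
    let out := if d.length > 5 then out ++ '.' :: ((d.drop 5).take 3) else out
    let out := if d.length > 8 then out ++ '/' :: ((d.drop 8).take 4) else out
    let out := if d.length > 12 then out ++ '-' :: ((d.drop 12).take 2) else out
    out

def display_cnpj (digits : String) : String :=
  String.ofList (pvFmtA ((digits.toList.filter fun c => PySem.Chars.isdigit c).take 14))

-- ===== PORT B =====
-- the separator dict of Source B
def pvSep : PySem.Dict Int (List Char) := PySem.Dict.ofList [((2:Int), ['.']), (5, ['.']), (8, ['/']), (12, ['-'])]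

def pvFmtB (d : List Char) : List Char :=
  (PySem.List.enumerate d 0).foldl
    (fun out ic => out ++ PySem.Dict.getD pvSep ic.1 [] ++ [ic.2]) []

def display_cnpj_alt (digits : String) : String :=
  String.ofList (pvFmtB ((digits.toList.filter fun c => PySem.Chars.isdigit c).take 14))

-- ===== PRECONDITION & SPEC =====
def Spec_display_cnpj (digits : String) (out : String) : Prop := out = display_cnpj_alt digits
instance (digits : String) (out : String) : Decidable (Spec_display_cnpj digits out) := by unfold Spec_display_cnpj; infer_instance

-- ===== CLAIM (what is proved, stated in full; the proofs are below) =====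
def Claim_equal_display_cnpj : Prop := ∀ (digits : String), Dom_display_cnpj digits → Spec_display_cnpj digits (display_cnpj digits)

-- ===== LEMMAS AND PROOFS =====
theorem pvSep_g0 : PySem.Dict.getD pvSep 0 [] = [] := by decide
theorem pvSep_g1 : PySem.Dict.getD pvSep 1 [] = [] := by decide
theorem pvSep_g2 : PySem.Dict.getD pvSep 2 [] = ['.'] := by decide
theorem pvSep_g3 : PySem.Dict.getD pvSep 3 [] = [] := by decide
theorem pvSep_g4 : PySem.Dict.getD pvSep 4 [] = [] := by decide
theorem pvSep_g5 : PySem.Dict.getD pvSep 5 [] = ['.'] := by decide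
theorem pvSep_g6 : PySem.Dict.getD pvSep 6 [] = [] := by decide
theorem pvSep_g7 : PySem.Dict.getD pvSep 7 [] = [] := by decide
theorem pvSep_g8 : PySem.Dict.getD pvSep 8 [] = ['/'] := by decide
theorem pvSep_g9 : PySem.Dict.getD pvSep 9 [] = [] := by decide
theorem pvSep_g10 : PySem.Dict.getD pvSep 10 [] = [] := by decide
theorem pvSep_g11 : PySem.Dict.getD pvSep 11 [] = [] := by decide
theorem pvSep_g12 : PySem.Dict.getD pvSep 12 [] = ['-'] := by decide
theorem pvSep_g13 : PySem.Dict.getD pvSep 13 [] = [] := by decide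
theorem pvFmt_eq (d : List Char) (h : d.length ≤ 14) : pvFmtA d = pvFmtB d := by
  rcases d with _|⟨c1,d⟩; · simp [pvFmtA, pvFmtB, PySem.List.enumerate, pvSep_g0, pvSep_g1, pvSep_g2, pvSep_g3, pvSep_g4, pvSep_g5, pvSep_g6, pvSep_g7, pvSep_g8, pvSep_g9, pvSep_g10, pvSep_g11, pvSep_g12, pvSep_g13]
  rcases d with _|⟨c2,d⟩; · simp [pvFmtA, pvFmtB, PySem.List.enumerate, pvSep_g0, pvSep_g1, pvSep_g2, pvSep_g3, pvSep_g4, pvSep_g5, pvSep_g6, pvSep_g7, pvSep_g8, pvSep_g9, pvSep_g10, pvSep_g11, pvSep_g12, pvSep_g13]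
  rcases d with _|⟨c3,d⟩; · simp [pvFmtA, pvFmtB, PySem.List.enumerate, pvSep_g0, pvSep_g1, pvSep_g2, pvSep_g3, pvSep_g4, pvSep_g5, pvSep_g6, pvSep_g7, pvSep_g8, pvSep_g9, pvSep_g10, pvSep_g11, pvSep_g12, pvSep_g13]
  rcases d with _|⟨c4,d⟩; · simp [pvFmtA, pvFmtB, PySem.List.enumerate, pvSep_g0, pvSep_g1, pvSep_g2, pvSep_g3, pvSep_g4, pvSep_g5, pvSep_g6, pvSep_g7, pvSep_g8, pvSep_g9, pvSep_g10, pvSep_g11, pvSep_g12, pvSep_g13]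
  rcases d with _|⟨c5,d⟩; · simp [pvFmtA, pvFmtB, PySem.List.enumerate, pvSep_g0, pvSep_g1, pvSep_g2, pvSep_g3, pvSep_g4, pvSep_g5, pvSep_g6, pvSep_g7, pvSep_g8, pvSep_g9, pvSep_g10, pvSep_g11, pvSep_g12, pvSep_g13]
  rcases d with _|⟨c6,d⟩; · simp [pvFmtA, pvFmtB, PySem.List.enumerate, pvSep_g0, pvSep_g1, pvSep_g2, pvSep_g3, pvSep_g4, pvSep_g5, pvSep_g6, pvSep_g7, pvSep_g8, pvSep_g9, pvSep_g10, pvSep_g11, pvSep_g12, pvSep_g13]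
  rcases d with _|⟨c7,d⟩; · simp [pvFmtA, pvFmtB, PySem.List.enumerate, pvSep_g0, pvSep_g1, pvSep_g2, pvSep_g3, pvSep_g4, pvSep_g5, pvSep_g6, pvSep_g7, pvSep_g8, pvSep_g9, pvSep_g10, pvSep_g11, pvSep_g12, pvSep_g13]
  rcases d with _|⟨c8,d⟩; · simp [pvFmtA, pvFmtB, PySem.List.enumerate, pvSep_g0, pvSep_g1, pvSep_g2, pvSep_g3, pvSep_g4, pvSep_g5, pvSep_g6, pvSep_g7, pvSep_g8, pvSep_g9, pvSep_g10, pvSep_g11, pvSep_g12, pvSep_g13]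
  rcases d with _|⟨c9,d⟩; · simp [pvFmtA, pvFmtB, PySem.List.enumerate, pvSep_g0, pvSep_g1, pvSep_g2, pvSep_g3, pvSep_g4, pvSep_g5, pvSep_g6, pvSep_g7, pvSep_g8, pvSep_g9, pvSep_g10, pvSep_g11, pvSep_g12, pvSep_g13]
  rcases d with _|⟨c10,d⟩; · simp [pvFmtA, pvFmtB, PySem.List.enumerate, pvSep_g0, pvSep_g1, pvSep_g2, pvSep_g3, pvSep_g4, pvSep_g5, pvSep_g6, pvSep_g7, pvSep_g8, pvSep_g9, pvSep_g10, pvSep_g11, pvSep_g12, pvSep_g13]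
  rcases d with _|⟨c11,d⟩; · simp [pvFmtA, pvFmtB, PySem.List.enumerate, pvSep_g0, pvSep_g1, pvSep_g2, pvSep_g3, pvSep_g4, pvSep_g5, pvSep_g6, pvSep_g7, pvSep_g8, pvSep_g9, pvSep_g10, pvSep_g11, pvSep_g12, pvSep_g13]
  rcases d with _|⟨c12,d⟩; · simp [pvFmtA, pvFmtB, PySem.List.enumerate, pvSep_g0, pvSep_g1, pvSep_g2, pvSep_g3, pvSep_g4, pvSep_g5, pvSep_g6, pvSep_g7, pvSep_g8, pvSep_g9, pvSep_g10, pvSep_g11, pvSep_g12, pvSep_g13]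
  rcases d with _|⟨c13,d⟩; · simp [pvFmtA, pvFmtB, PySem.List.enumerate, pvSep_g0, pvSep_g1, pvSep_g2, pvSep_g3, pvSep_g4, pvSep_g5, pvSep_g6, pvSep_g7, pvSep_g8, pvSep_g9, pvSep_g10, pvSep_g11, pvSep_g12, pvSep_g13]
  rcases d with _|⟨c14,d⟩; · simp [pvFmtA, pvFmtB, PySem.List.enumerate, pvSep_g0, pvSep_g1, pvSep_g2, pvSep_g3, pvSep_g4, pvSep_g5, pvSep_g6, pvSep_g7, pvSep_g8, pvSep_g9, pvSep_g10, pvSep_g11, pvSep_g12, pvSep_g13]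
  rcases d with _|⟨c15,d⟩
  · simp [pvFmtA, pvFmtB, PySem.List.enumerate, pvSep_g0, pvSep_g1, pvSep_g2, pvSep_g3, pvSep_g4, pvSep_g5, pvSep_g6, pvSep_g7, pvSep_g8, pvSep_g9, pvSep_g10, pvSep_g11, pvSep_g12, pvSep_g13]
  · simp at h; omega

-- ===== VERDICT (by name: the statement is the Claim_ definition above) =====
theorem display_cnpj_spec : Claim_equal_display_cnpj := by
  intro digits _
  unfold Spec_display_cnpj display_cnpj display_cnpj_alt
  rw [pvFmt_eq _ (List.length_take_le _ _)]
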